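-- pv_equiv track=rewrite | github.com/Lebarnon/AdventOfCode | day13/solution.py | stringToQueue
-- ===== SOURCE A (Python) =====
-- def stringToQueue(input):
--   # remove outer brackets
--   input = input[1:-1]
--   bracketQueue = []
--   resultQ = []
--   i=0
--   cur = ""
--   while(i<len(input)):
--     if(input[i] == ","):
--       resultQ.append(cur)
--       cur = ""
--     elif(input[i] == "["):
--       bracketQueue.append("[")
--       cur += input[i]
--       while(len(bracketQueue)>0):
--         i += 1
--         cur += input[i]
--         if(input[i] == "["):
--           bracketQueue.append("[")
--         if(input[i] == "]"):
--           bracketQueue.pop()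
--     else:
--       cur += input[i]
--     i += 1
--   if len(cur) > 0:
--     resultQ.append(cur)
--   return resultQ
-- ===== SOURCE B (Python) =====
-- def stringToQueue(input):
--   # one flat pass with a depth counter instead of an explicit bracket stack
--   s = input[1:-1]
--   res = []
--   cur = ""
--   depth = 0
--   for ch in s:
--     if ch == '[':
--       depth += 1
--       cur += ch
--     elif ch == ']' and depth > 0:
--       depth -= 1
--       cur += ch
--     elif ch == ',' and depth == 0:
--       res.append(cur)
--       cur = ""
--     else:
--       cur += ch
--   if cur:
--     res.append(cur)
--   return res
-- ===== Notes on version B (the rewrite author's own statement) =====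
-- stated objective: simpler
-- what changed: Replaced A's explicit bracketQueue stack and nested inner while-loop over a manual index with one flat for-loop over the outer-bracket-stripped string that maintains an integer depth counter and flushes on top-level commas.
import Mathlib
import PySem

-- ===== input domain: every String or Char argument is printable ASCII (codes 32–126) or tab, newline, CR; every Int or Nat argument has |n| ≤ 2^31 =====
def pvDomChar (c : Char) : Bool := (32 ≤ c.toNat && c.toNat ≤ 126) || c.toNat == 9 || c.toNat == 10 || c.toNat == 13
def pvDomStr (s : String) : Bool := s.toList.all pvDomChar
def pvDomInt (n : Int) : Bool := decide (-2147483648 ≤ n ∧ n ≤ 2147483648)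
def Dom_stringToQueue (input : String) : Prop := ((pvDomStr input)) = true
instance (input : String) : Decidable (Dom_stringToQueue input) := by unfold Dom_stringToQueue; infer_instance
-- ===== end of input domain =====

-- B replaces A's explicit bracket stack and nested inner while-loop by one flat
-- pass with an integer depth counter (objective: simpler).

-- ===== PORT A =====
-- inner while-loop of A: `while len(bracketQueue) > 0: i += 1; cur += input[i]; …`
-- `none` = the Python IndexError on `input[i]` when i+1 runs past the end (excluded
-- by Pre_). `fuel` only makes the recursion structural; `fuel = len(input) + 1` is
-- enough for every run (each step advances i).
def pvInnerA (fuel : Nat) (cs : List Char) (i stack : Nat) (cur : List Char) :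
    Option (Nat × List Char) :=
  match fuel with
  | 0 => none
  | fuel + 1 =>
    if stack = 0 then some (i, cur)
    else
      match cs[i+1]? with
      | none => none
      | some c =>
        pvInnerA fuel cs (i+1)
          (if c = '[' then stack + 1 else if c = ']' then stack - 1 else stack)
          (cur ++ [c])

-- outer while-loop of A over index i, state (cur, resultQ); `cs[i]? = none` is the
-- exit test `i < len(input)`
def pvOuterA (fuel : Nat) (cs : List Char) (i : Nat) (cur : List Char)
    (resultQ : List String) : List String :=
  match fuel with
  | 0 => resultQ   -- never reached with fuel = len(input) + 1
  | fuel + 1 =>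
    match cs[i]? with
    | none => if cur.length > 0 then resultQ ++ [String.ofList cur] else resultQ
    | some c =>
      if c = ',' then pvOuterA fuel cs (i+1) [] (resultQ ++ [String.ofList cur])
      else if c = '[' then
        match pvInnerA (cs.length + 1) cs i 1 (cur ++ [c]) with
        | none => resultQ   -- Python raises IndexError here (outside Pre_)
        | some (j, cur') => pvOuterA fuel cs (j+1) cur' resultQ
      else pvOuterA fuel cs (i+1) (cur ++ [c]) resultQ

def stringToQueue (input : String) : List String :=
  pvOuterA ((PySem.List.slice input.toList (some 1) (some (-1))).length + 1)
    (PySem.List.slice input.toList (some 1) (some (-1))) 0 [] []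

-- ===== PORT B =====
-- flat loop of Source B: depth counter, flush cur on top-level comma
def pvLoopB (s : List Char) (depth : Nat) (cur : List Char) (res : List String) :
    List String :=
  match s with
  | [] => if cur ≠ [] then res ++ [String.ofList cur] else res
  | c :: rest =>
    if c = '[' then pvLoopB rest (depth + 1) (cur ++ [c]) res
    else if c = ']' ∧ depth > 0 then pvLoopB rest (depth - 1) (cur ++ [c]) res
    else if c = ',' ∧ depth = 0 then pvLoopB rest 0 [] (res ++ [String.ofList cur])
    else pvLoopB rest depth (cur ++ [c]) res

def stringToQueue_alt (input : String) : List String :=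
  pvLoopB (PySem.List.slice input.toList (some 1) (some (-1))) 0 [] []

-- ===== PRECONDITION & SPEC =====
-- Pre_ excludes exactly the inputs with an unclosed '[' after stripping the outer
-- brackets: there A's inner loop indexes past the end and raises IndexError.
-- Closed form: in every suffix of the stripped string, ']' occurs at least as
-- often as '[' (equivalently, no '[' is left open at the end).
def Pre_stringToQueue (input : String) : Prop :=
  ∀ i ≤ (PySem.List.slice input.toList (some 1) (some (-1))).length,
    ((PySem.List.slice input.toList (some 1) (some (-1))).drop i).count '[' ≤
    ((PySem.List.slice input.toList (some 1) (some (-1))).drop i).count ']'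
instance (input : String) : Decidable (Pre_stringToQueue input) := by
  unfold Pre_stringToQueue; infer_instance

def pvWitness_stringToQueue : String := "[1,[2,3],]"

def Spec_stringToQueue (input : String) (out : List String) : Prop :=
  out = stringToQueue_alt input
instance (input : String) (out : List String) : Decidable (Spec_stringToQueue input out) := by
  unfold Spec_stringToQueue; infer_instance

-- ===== CLAIM (what is proved, stated in full; the proofs are below) =====
def Claim_equal_stringToQueue : Prop := ∀ (input : String), Dom_stringToQueue input → Pre_stringToQueue input → Spec_stringToQueue input (stringToQueue input)

-- ===== LEMMAS AND PROOFS =====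

-- bracket balance of a scan from depth d: '[' opens, ']' closes an open bracket
-- (a stray ']' at depth 0 is plain text)
def pvBal (d : Nat) (s : List Char) : Nat :=
  match s with
  | [] => d
  | c :: rest =>
      pvBal (if c = '[' then d + 1 else if c = ']' ∧ d > 0 then d - 1 else d) rest


theorem pvDrop_cons (cs : List Char) (i : Nat) (h : i < cs.length) :
    cs.drop i = cs[i] :: cs.drop (i+1) :=
  List.drop_eq_getElem_cons h

-- the clamped balance counter is 0 iff every suffix closes at least as many
-- brackets as it opens
theorem pvBal_zero_iff (s : List Char) : ∀ d : Nat,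
    (pvBal d s = 0 ↔
      (d + s.count '[' ≤ s.count ']' ∧
        ∀ i, (s.drop i).count '[' ≤ (s.drop i).count ']')) := by
  induction s with
  | nil => intro d; simp [pvBal]
  | cons c rest ih =>
    intro d
    have hsplit : (∀ i, ((c :: rest).drop i).count '[' ≤ ((c :: rest).drop i).count ']') ↔
        ((c :: rest).count '[' ≤ (c :: rest).count ']' ∧
          ∀ i, (rest.drop i).count '[' ≤ (rest.drop i).count ']') := by
      constructor
      · intro h; exact ⟨h 0, fun i => h (i+1)⟩
      · rintro ⟨h0, h⟩ i
        cases i with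
        | zero => exact h0
        | succ i => simpa using h i
    rw [pvBal]
    rcases eq_or_ne c '[' with h1 | h1
    · subst h1
      rw [show (if ('[':Char) = '[' then d + 1 else if ('[':Char) = ']' ∧ d > 0 then d - 1 else d)
          = d + 1 from by simp]
      have ca : (('[':Char) :: rest).count '[' = rest.count '[' + 1 := by simp
      have cb : (('[':Char) :: rest).count ']' = rest.count ']' := by simp
      rw [ih, hsplit, ca, cb]
      constructor
      · rintro ⟨hx, hS⟩
        exact ⟨by omega, by omega, hS⟩
      · rintro ⟨hx, _, hS⟩
        exact ⟨by omega, hS⟩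
    · rcases eq_or_ne c ']' with h2 | h2
      · subst h2
        have ca : ((']':Char) :: rest).count '[' = rest.count '[' := by simp
        have cb : ((']':Char) :: rest).count ']' = rest.count ']' + 1 := by simp
        by_cases hd : d > 0
        · rw [show (if (']':Char) = '[' then d + 1 else if (']':Char) = ']' ∧ d > 0 then d - 1 else d)
              = d - 1 from by simp [hd]]
          rw [ih, hsplit, ca, cb]
          constructor
          · rintro ⟨hx, hS⟩
            have h0 := hS 0
            simp only [List.drop_zero] at h0
            exact ⟨by omega, by omega, hS⟩
          · rintro ⟨hx, _, hS⟩
            exact ⟨by omega, hS⟩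
        · have hd0 : d = 0 := by omega
          subst hd0
          rw [show (if (']':Char) = '[' then 0 + 1 else if (']':Char) = ']' ∧ 0 > 0 then 0 - 1 else 0)
              = 0 from by simp]
          rw [ih, hsplit, ca, cb]
          constructor
          · rintro ⟨hx, hS⟩
            exact ⟨by omega, by omega, hS⟩
          · rintro ⟨_, _, hS⟩
            have h0 := hS 0
            simp only [List.drop_zero] at h0
            exact ⟨by omega, hS⟩
      · have ca : (c :: rest).count '[' = rest.count '[' := by simp [h1]
        have cb : (c :: rest).count ']' = rest.count ']' := by simp [h2]
        rw [show (if c = '[' then d + 1 else if c = ']' ∧ d > 0 then d - 1 else d)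
            = d from by simp [h1, h2]]
        rw [ih, hsplit, ca, cb]
        constructor
        · rintro ⟨hx, hS⟩
          have h0 := hS 0
          simp only [List.drop_zero] at h0
          exact ⟨hx, by omega, hS⟩
        · rintro ⟨hx, _, hS⟩
          exact ⟨hx, hS⟩

-- Pre_ (the suffix-count condition) says exactly that the clamped balance ends at 0
theorem pvPre_iff_bal (input : String) :
    Pre_stringToQueue input ↔
      pvBal 0 (PySem.List.slice input.toList (some 1) (some (-1))) = 0 := by
  unfold Pre_stringToQueue
  rw [pvBal_zero_iff _ 0]
  constructor
  · intro h
    refine ⟨by simpa using h 0 (by omega), fun i => ?_⟩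
    by_cases hi : i ≤ (PySem.List.slice input.toList (some 1) (some (-1))).length
    · exact h i hi
    · rw [List.drop_of_length_le (by omega)]; simp
  · rintro ⟨_, h⟩ i _
    exact h i

-- inner loop of A ≡ running B's loop at positive depth until it returns to 0
theorem pvInner_spec (cs : List Char) :
    ∀ fuel i stack cur, cs.length - i ≤ fuel → stack ≠ 0 →
      pvBal stack (cs.drop (i+1)) = 0 →
      ∃ j cur', pvInnerA fuel cs i stack cur = some (j, cur') ∧ i < j ∧ j < cs.length ∧
        pvBal 0 (cs.drop (j+1)) = 0 ∧
        (∀ res, pvLoopB (cs.drop (i+1)) stack cur res = pvLoopB (cs.drop (j+1)) 0 cur' res) := by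
  intro fuel
  induction fuel with
  | zero =>
    intro i stack cur hn hs hb
    exfalso
    rw [List.drop_of_length_le (by omega)] at hb
    simp [pvBal] at hb
    exact hs hb
  | succ fuel ih =>
    intro i stack cur hn hs hb
    by_cases hlen : i + 1 < cs.length
    · have hdrop := pvDrop_cons cs (i+1) hlen
      set c := cs[i+1] with hc
      have hget : cs[i+1]? = some c := List.getElem?_eq_getElem hlen
      rw [hdrop] at hb
      set stack' := if c = '[' then stack + 1 else if c = ']' then stack - 1 else stack with hstack'
      have hbal' : pvBal stack' (cs.drop (i+1+1)) = 0 := by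
        rw [pvBal] at hb
        have heq : (if c = '[' then stack + 1 else if c = ']' ∧ stack > 0 then stack - 1 else stack) = stack' := by
          rw [hstack']
          rcases eq_or_ne c '[' with h1 | h1
          · simp [h1]
          · rcases eq_or_ne c ']' with h2 | h2
            · simp [h2, Nat.pos_of_ne_zero hs]
            · simp [h1, h2]
        rwa [heq] at hb
      have hunf : pvInnerA (fuel+1) cs i stack cur = pvInnerA fuel cs (i+1) stack' (cur ++ [c]) := by
        rw [pvInnerA]
        simp [hs, hget]
        rw [hstack']
      have hstepB : ∀ res, pvLoopB (cs.drop (i+1)) stack cur res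
          = pvLoopB (cs.drop (i+1+1)) stack' (cur ++ [c]) res := by
        intro res
        rw [hdrop, pvLoopB, hstack']
        have hspos : stack > 0 := Nat.pos_of_ne_zero hs
        by_cases h1 : c = '['
        · simp [h1]
        · by_cases h2 : c = ']'
          · simp [h2, hspos]
          · by_cases h3 : c = ','
            · simp [h3, hs]
            · simp [h1, h2, h3]
      by_cases h0 : stack' = 0
      · refine ⟨i+1, cur ++ [c], ?_, by omega, hlen, by rwa [h0] at hbal', ?_⟩
        · cases fuel with
          | zero => omega
          | succ fuel => rw [hunf, pvInnerA, if_pos h0]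
        · intro res
          rw [hstepB res, h0]
      · obtain ⟨j, cur', hrec, hij, hjl, hbj, hloop⟩ :=
          ih (i+1) stack' (cur ++ [c]) (by omega) h0 hbal'
        exact ⟨j, cur', by rw [hunf]; exact hrec, by omega, hjl, hbj,
          fun res => by rw [hstepB res, hloop res]⟩
    · exfalso
      rw [List.drop_of_length_le (by omega)] at hb
      simp [pvBal] at hb
      exact hs hb

-- outer loop of A ≡ B's flat loop, at top level (depth 0)
theorem pvOuter_spec (cs : List Char) :
    ∀ fuel i cur res, i ≤ cs.length → cs.length + 1 - i ≤ fuel →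
      pvBal 0 (cs.drop i) = 0 →
      pvOuterA fuel cs i cur res = pvLoopB (cs.drop i) 0 cur res := by
  intro fuel
  induction fuel with
  | zero => intro i cur res hi hn _; omega
  | succ fuel ih =>
    intro i cur res hile hn hb
    by_cases hi : i < cs.length
    · have hdrop := pvDrop_cons cs i hi
      have hget : cs[i]? = some cs[i] := List.getElem?_eq_getElem hi
      rw [hdrop] at hb ⊢
      rw [pvBal] at hb
      rw [pvOuterA, hget]
      simp only []
      rw [pvLoopB]
      by_cases h1 : cs[i] = ','
      · have hb' : pvBal 0 (cs.drop (i+1)) = 0 := by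
          have heq : (if cs[i] = '[' then 0+1 else if cs[i] = ']' ∧ 0 > 0 then 0-1 else 0) = 0 := by
            simp [h1]
          rwa [heq] at hb
        rw [if_pos h1, if_neg (by simp [h1]), if_neg (by simp [h1]), if_pos ⟨h1, rfl⟩]
        exact ih (i+1) [] _ (by omega) (by omega) hb'
      · by_cases h2 : cs[i] = '['
        · have hb1 : pvBal 1 (cs.drop (i+1)) = 0 := by
            have heq : (if cs[i] = '[' then 0+1 else if cs[i] = ']' ∧ 0 > 0 then 0-1 else 0) = 1 := by
              simp [h2]
            rwa [heq] at hb
          obtain ⟨j, cur', hinner, hij, hjl, hbj, hloop⟩ :=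
            pvInner_spec cs (cs.length + 1) i 1 (cur ++ [cs[i]]) (by omega) one_ne_zero hb1
          rw [if_neg h1, if_pos h2, hinner, if_pos h2]
          rw [hloop res]
          exact ih (j+1) cur' res (by omega) (by omega) hbj
        · have hb' : pvBal 0 (cs.drop (i+1)) = 0 := by
            have heq : (if cs[i] = '[' then 0+1 else if cs[i] = ']' ∧ 0 > 0 then 0-1 else 0) = 0 := by
              simp [h2]
            rwa [heq] at hb
          rw [if_neg h1, if_neg h2, if_neg h2,
            if_neg (by simp : ¬ (cs[i] = ']' ∧ 0 > 0)), if_neg (by simp [h1])]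
          exact ih (i+1) (cur ++ [cs[i]]) res (by omega) (by omega) hb'
    · have hget : cs[i]? = none := List.getElem?_eq_none (by omega)
      rw [pvOuterA, hget, List.drop_of_length_le (by omega), pvLoopB]
      by_cases hcur : cur = []
      · simp [hcur]
      · have hpos : cur.length > 0 := List.length_pos_iff.mpr hcur
        simp [hcur, hpos]

-- ===== VERDICT (by name: the statement is the Claim_ definition above) =====
theorem stringToQueue_spec : Claim_equal_stringToQueue := by
  intro input _ hpre
  unfold Spec_stringToQueue stringToQueue stringToQueue_alt
  have hb : pvBal 0 ((PySem.List.slice input.toList (some 1) (some (-1))).drop 0) = 0 := by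
    rw [List.drop_zero]; exact (pvPre_iff_bal input).mp hpre
  simpa using pvOuter_spec _ _ 0 [] [] (by omega) (by omega) hb
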